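-- pv_equiv track=rewrite | github.com/tom-mad/Python | Lab_07/main.py | numberEquation
-- ===== SOURCE A (Python) =====
-- def numberEquation(n):
--   tmp = 1
--   while tmp < n:
--     s,eq,fill=0,[],tmp
--     while s != n:
--       while s+fill > n:
--         fill = fill-1
--       s=s+fill
--       eq.append(fill)
--       fill=tmp
--     tmp=tmp+1
--     yield eq
--   return
-- ===== SOURCE B (Python) =====
-- def numberEquation(n):
--   # Closed form per part size: n = tmp*(n//tmp) + n%tmp, no decrement loops.
--   for tmp in range(1, n):
--     q, r = divmod(n, tmp)
--     yield [tmp] * q + ([r] if r else [])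
-- ===== Notes on version B (the rewrite author's own statement) =====
-- stated objective: faster
-- what changed: Replaced the greedy simulation (inner accumulation loop plus a unit-decrement overshoot loop per part size) by the closed form divmod: each row is [tmp]*(n//tmp) plus the remainder if nonzero.
import Mathlib
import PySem

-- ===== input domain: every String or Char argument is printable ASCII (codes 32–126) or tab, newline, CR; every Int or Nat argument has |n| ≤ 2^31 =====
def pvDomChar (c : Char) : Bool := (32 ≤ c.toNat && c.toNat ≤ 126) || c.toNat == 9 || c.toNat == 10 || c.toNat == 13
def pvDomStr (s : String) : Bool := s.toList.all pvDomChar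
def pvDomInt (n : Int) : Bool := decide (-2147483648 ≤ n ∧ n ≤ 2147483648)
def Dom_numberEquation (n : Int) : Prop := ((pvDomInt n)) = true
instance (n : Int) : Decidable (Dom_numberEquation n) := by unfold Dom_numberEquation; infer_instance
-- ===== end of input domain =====

-- B replaces A's greedy simulation by the closed form divmod per part size (asymptotically faster).

-- ===== PORT A =====
-- 'while s+fill > n: fill = fill-1'
def pvShrink (n s fill : Int) : Int :=
  if s + fill > n then pvShrink n s (fill - 1) else fill
termination_by (s + fill - n).toNat
decreasing_by omega

-- inner 'while s != n' loop; fuel makes the recursion total (A is only ever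
-- in this loop with tmp ≥ 1, where at most n iterations happen)
def pvInner (fuel : Nat) (n tmp s : Int) (eq : List Int) : List Int :=
  match fuel with
  | 0 => eq
  | fuel + 1 =>
    if s ≠ n then
      let fill := pvShrink n s tmp
      pvInner fuel n tmp (s + fill) (eq ++ [fill])
    else eq

-- outer 'while tmp < n' loop, yielding one eq per tmp
def pvOuter (n tmp : Int) : List (List Int) :=
  if tmp < n then pvInner n.toNat n tmp 0 [] :: pvOuter n (tmp + 1)
  else []
termination_by (n - tmp).toNat
decreasing_by omega

def numberEquation (n : Int) : List (List Int) := pvOuter n 1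

-- ===== PORT B =====
def numberEquation_alt (n : Int) : List (List Int) :=
  (PySem.List.pyRange 1 n 1).map (fun tmp =>
    let q := PySem.Int.floordiv n tmp
    let r := PySem.Int.mod n tmp
    List.replicate q.toNat tmp ++ (if r ≠ 0 then [r] else []))

-- ===== PRECONDITION & SPEC =====
def Spec_numberEquation (n : Int) (out : List (List Int)) : Prop := out = numberEquation_alt n
instance (n : Int) (out : List (List Int)) : Decidable (Spec_numberEquation n out) := by unfold Spec_numberEquation; infer_instance

-- ===== CLAIM (what is proved, stated in full; the proofs are below) =====
def Claim_equal_numberEquation : Prop := ∀ (n : Int), Dom_numberEquation n → Spec_numberEquation n (numberEquation n)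

-- ===== LEMMAS AND PROOFS =====

theorem pvShrink_eq (n s fill : Int) :
    pvShrink n s fill = if s + fill ≤ n then fill else n - s := by
  rw [pvShrink]
  by_cases h : s + fill > n
  · rw [if_pos h, pvShrink_eq n s (fill - 1)]
    split_ifs <;> omega
  · rw [if_neg h]
    split_ifs <;> omega
termination_by (s + fill - n).toNat
decreasing_by omega

theorem pvInner_eq (fuel : Nat) (n tmp s : Int) (eq : List Int)
    (htmp : 1 ≤ tmp) (hs : s ≤ n) (hfuel : (n - s).toNat ≤ fuel) :
    pvInner fuel n tmp s eq =
      eq ++ List.replicate ((n - s) / tmp).toNat tmp ++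
        (if (n - s) % tmp ≠ 0 then [(n - s) % tmp] else []) := by
  induction fuel generalizing s eq with
  | zero =>
    have hsn : n - s = 0 := by omega
    rw [pvInner, hsn]
    simp
  | succ fuel ih =>
    rw [pvInner]
    by_cases hne : s = n
    · subst hne
      simp
    · simp only [if_pos hne, pvShrink_eq]
      by_cases hfit : s + tmp ≤ n
      · rw [if_pos hfit]
        rw [ih (s + tmp) (eq ++ [tmp]) (by omega) (by omega)]
        have hq : (n - s) / tmp = (n - (s + tmp)) / tmp + 1 := by
          have := Int.add_mul_ediv_right (n - (s + tmp)) 1 (show tmp ≠ 0 by omega)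
          have harg : n - (s + tmp) + 1 * tmp = n - s := by ring
          rw [harg] at this
          omega
        have hm : (n - s) % tmp = (n - (s + tmp)) % tmp := by
          have := Int.add_mul_emod_self_left (a := n - (s + tmp)) (b := tmp) (c := 1)
          have harg : n - (s + tmp) + tmp * 1 = n - s := by ring
          rw [harg] at this
          omega
        have hq0 : 0 ≤ (n - (s + tmp)) / tmp := Int.ediv_nonneg (by omega) (by omega)
        rw [hq, hm]
        have htn : ((n - (s + tmp)) / tmp + 1).toNat = ((n - (s + tmp)) / tmp).toNat + 1 := by omega
        rw [htn, List.replicate_succ]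
        simp
      · rw [if_neg hfit]
        rw [show s + (n - s) = n from by ring, ih n (eq ++ [n - s]) (by omega) (by omega)]
        have hq : (n - s) / tmp = 0 := Int.ediv_eq_zero_of_lt (by omega) (by omega)
        have hm : (n - s) % tmp = n - s := Int.emod_eq_of_lt (by omega) (by omega)
        have hr0 : ¬ (n - s = 0) := by omega
        rw [hq, hm]
        simp [hr0]

theorem pvOuter_eq (n tmp : Int) (htmp : 1 ≤ tmp) :
    pvOuter n tmp = (PySem.List.pyRange tmp n 1).map (fun t =>
      let q := PySem.Int.floordiv n t
      let r := PySem.Int.mod n t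
      List.replicate q.toNat t ++ (if r ≠ 0 then [r] else [])) := by
  rw [pvOuter]
  split_ifs with h
  · rw [PySem.List.pyRange_one_cons h, List.map_cons,
        pvOuter_eq n (tmp + 1) (by omega),
        pvInner_eq n.toNat n tmp 0 [] htmp (by omega) (by omega)]
    simp only [PySem.Int.floordiv_eq_ediv_of_pos (show (0:Int) < tmp by omega),
      PySem.Int.mod_eq_emod_of_pos (show (0:Int) < tmp by omega), sub_zero,
      List.nil_append]
  · rw [PySem.List.pyRange_one_eq_nil (by omega), List.map_nil]
termination_by (n - tmp).toNat
decreasing_by omega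

-- ===== VERDICT (by name: the statement is the Claim_ definition above) =====
theorem numberEquation_spec : Claim_equal_numberEquation := by
  intro n _
  show numberEquation n = numberEquation_alt n
  simp [numberEquation, numberEquation_alt, pvOuter_eq n 1 le_rfl]
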